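-- pv_equiv track=rewrite | github.com/wanjun-group-seu/AQUARIUM | side_effects/extract_bam_junction.py | __bsj_total_circ_design
-- ===== SOURCE A (Python) =====
-- def strip_junction_str(str_junction):
--     if "." in str_junction:
--         return str_junction.strip().split(".")[0]
--     else:
--         return str_junction
--
-- def origin_of_simulated_read(read_id):
--     num, origin_str = read_id.strip().split("/")
--     return strip_junction_str(origin_str)
--
-- def __bsj_total_circ_design(bsj_id, reads_overlap_bsj):
--     num_reads_from_circ = 0
--     num_reads_designed = 0  # this means this read is from the same junction as the simulation setting
--     num_reads_this_junction = 0
--     for read_id in reads_overlap_bsj: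
--         num_reads_this_junction += 1
--         read_origin = origin_of_simulated_read(read_id)
--         if read_origin.startswith("chr"):
--             num_reads_from_circ += 1
--         if read_origin == strip_junction_str(bsj_id):
--             num_reads_designed += 1
--     report_line_for_this_bsj = "{bsj}\t{total}\t{circ}\t{design}\n".format(bsj=bsj_id,
--                                                                            total=num_reads_this_junction,
--                                                                            circ=num_reads_from_circ,
--                                                                            design=num_reads_designed)
--     return report_line_for_this_bsj
-- ===== SOURCE B (Python) =====
-- def strip_junction_str(str_junction):
--     if "." in str_junction:
--         return str_junction.strip().split(".")[0]
--     else: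
--         return str_junction
--
--
-- def origin_of_simulated_read(read_id):
--     num, origin_str = read_id.strip().split("/")
--     return strip_junction_str(origin_str)
--
--
-- def __bsj_total_circ_design(bsj_id, reads_overlap_bsj):
--     # Group the reads by origin into a frequency dictionary, then aggregate
--     # per DISTINCT origin: the design count becomes one dict lookup and the
--     # circ count a sum over the distinct keys.
--     freq = {}
--     for read_id in reads_overlap_bsj:
--         o = origin_of_simulated_read(read_id)
--         freq[o] = freq.get(o, 0) + 1
--     total = sum(freq.values())
--     circ = sum(n for o, n in freq.items() if o.startswith("chr"))
--     design = freq.get(strip_junction_str(bsj_id), 0)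
--     return "{bsj}\t{total}\t{circ}\t{design}\n".format(bsj=bsj_id, total=total,
--                                                        circ=circ, design=design)
-- ===== Notes on version B (the rewrite author's own statement) =====
-- stated objective: alternative
-- what changed: Replaces the fused three-counter loop over reads by grouping the reads into a frequency dictionary keyed by distinct origin and then aggregating per distinct key: total = sum of the multiplicities, circ = sum of multiplicities of keys starting with 'chr', design = one dictionary lookup at the stripped bsj_id instead of n string comparisons.
import Mathlib
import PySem

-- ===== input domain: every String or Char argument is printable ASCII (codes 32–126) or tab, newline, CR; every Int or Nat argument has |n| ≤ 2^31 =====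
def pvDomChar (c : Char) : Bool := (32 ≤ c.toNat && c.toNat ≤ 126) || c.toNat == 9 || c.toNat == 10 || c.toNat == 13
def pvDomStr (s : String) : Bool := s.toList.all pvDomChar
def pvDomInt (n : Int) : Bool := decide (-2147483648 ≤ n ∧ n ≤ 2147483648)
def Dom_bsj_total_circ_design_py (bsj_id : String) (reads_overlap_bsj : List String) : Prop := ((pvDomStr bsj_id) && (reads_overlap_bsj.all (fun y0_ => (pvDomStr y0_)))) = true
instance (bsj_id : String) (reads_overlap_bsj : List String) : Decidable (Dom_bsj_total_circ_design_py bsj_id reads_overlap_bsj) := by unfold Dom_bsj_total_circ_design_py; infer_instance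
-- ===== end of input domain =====

-- B groups the reads into a frequency dictionary keyed by distinct origin and aggregates per
-- distinct key (design = one lookup, circ/total = sums over the distinct keys); objective: alternative.

-- ===== PORT A =====
-- shared module helper strip_junction_str (the split always yields a nonempty list, so [0] = headD "")
def pvStripJunction (s : String) : String :=
  if PySem.Str.isIn "." s then ((PySem.Str.split? (PySem.Str.strip s) ".").getD []).headD "" else s

-- shared module helper origin_of_simulated_read; the two-variable unpack is exact under
-- Pre_ (exactly two '/'-separated parts), where the second part is index 1
def pvOrigin (read_id : String) : String :=
  pvStripJunction (((PySem.Str.split? (PySem.Str.strip read_id) "/").getD []).getD 1 "")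

def bsj_total_circ_design_py (bsj_id : String) (reads_overlap_bsj : List String) : String :=
  let st := reads_overlap_bsj.foldl
    (fun (acc : Int × Int × Int) read_id =>
      let num_reads_this_junction := acc.2.2 + 1
      let read_origin := pvOrigin read_id
      let num_reads_from_circ :=
        if PySem.Str.startswith read_origin "chr" then acc.1 + 1 else acc.1
      let num_reads_designed :=
        if read_origin == pvStripJunction bsj_id then acc.2.1 + 1 else acc.2.1
      (num_reads_from_circ, num_reads_designed, num_reads_this_junction))
    (0, 0, 0)
  bsj_id ++ "\t" ++ PySem.Int.toStr st.2.2 ++ "\t" ++ PySem.Int.toStr st.1 ++ "\t"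
    ++ PySem.Int.toStr st.2.1 ++ "\n"

-- ===== PORT B =====
def bsj_total_circ_design_py_alt (bsj_id : String) (reads_overlap_bsj : List String) : String :=
  let freq : PySem.Dict String Int := reads_overlap_bsj.foldl
    (fun d read_id =>
      let o := pvOrigin read_id
      d.insert o (d.getD o 0 + 1))
    PySem.Dict.empty
  let total : Int := freq.values.sum
  let circ : Int := ((freq.items.filter (fun p => PySem.Str.startswith p.1 "chr")).map (·.2)).sum
  let design : Int := freq.getD (pvStripJunction bsj_id) 0
  bsj_id ++ "\t" ++ PySem.Int.toStr total ++ "\t" ++ PySem.Int.toStr circ ++ "\t"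
    ++ PySem.Int.toStr design ++ "\n"

-- ===== PRECONDITION & SPEC =====
-- Pre_ excludes exactly the reads on which Python's two-variable unpack of
-- read_id.strip().split("/") raises ValueError (not exactly two parts).
def Pre_bsj_total_circ_design_py (bsj_id : String) (reads_overlap_bsj : List String) : Prop :=
  ∀ r ∈ reads_overlap_bsj, ((PySem.Str.split? (PySem.Str.strip r) "/").getD []).length = 2
instance (bsj_id : String) (reads_overlap_bsj : List String) : Decidable (Pre_bsj_total_circ_design_py bsj_id reads_overlap_bsj) := by unfold Pre_bsj_total_circ_design_py; infer_instance

def pvWitness_bsj_total_circ_design_py : String × List String :=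
  ("chr1:10|20", ["1/chr1:10|20.mapped", "2/ENST0001"])

def Spec_bsj_total_circ_design_py (bsj_id : String) (reads_overlap_bsj : List String) (out : String) : Prop := out = bsj_total_circ_design_py_alt bsj_id reads_overlap_bsj
instance (bsj_id : String) (reads_overlap_bsj : List String) (out : String) : Decidable (Spec_bsj_total_circ_design_py bsj_id reads_overlap_bsj out) := by unfold Spec_bsj_total_circ_design_py; infer_instance

-- ===== CLAIM (what is proved, stated in full; the proofs are below) =====
def Claim_equal_bsj_total_circ_design_py : Prop := ∀ (bsj_id : String) (reads_overlap_bsj : List String), Dom_bsj_total_circ_design_py bsj_id reads_overlap_bsj → Pre_bsj_total_circ_design_py bsj_id reads_overlap_bsj → Spec_bsj_total_circ_design_py bsj_id reads_overlap_bsj (bsj_total_circ_design_py bsj_id reads_overlap_bsj)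

-- ===== LEMMAS AND PROOFS =====
-- A's fold computes (countP "chr", count target, length) shifted by the accumulator
theorem pv_fold_eq (bsj_id : String) (l : List String) (c d t : Int) :
    l.foldl
      (fun (acc : Int × Int × Int) read_id =>
        let num_reads_this_junction := acc.2.2 + 1
        let read_origin := pvOrigin read_id
        let num_reads_from_circ :=
          if PySem.Str.startswith read_origin "chr" then acc.1 + 1 else acc.1
        let num_reads_designed :=
          if read_origin == pvStripJunction bsj_id then acc.2.1 + 1 else acc.2.1
        (num_reads_from_circ, num_reads_designed, num_reads_this_junction))
      (c, d, t)
    = (c + ((l.map pvOrigin).countP (fun o => PySem.Str.startswith o "chr") : Int),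
       d + ((l.map pvOrigin).count (pvStripJunction bsj_id) : Int),
       t + (l.length : Int)) := by
  induction l generalizing c d t with
  | nil => simp
  | cons x xs ih =>
    simp only [List.foldl_cons, List.map_cons, List.length_cons, List.countP_cons, List.count_cons]
    rw [ih]
    by_cases h1 : PySem.Str.startswith (pvOrigin x) "chr" = true <;>
      by_cases h2 : (pvOrigin x == pvStripJunction bsj_id) = true <;>
        simp only [h1, h2, if_true, if_false, Bool.false_eq_true, Prod.mk.injEq] <;>
          refine ⟨by push_cast; omega, by push_cast; omega, by push_cast; omega⟩

-- sum of a p-guarded indicator at x over a nodup list containing x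
theorem pv_sum_indicator (p : String → Bool) (x : String) :
    ∀ (ks : List String), ks.Nodup → x ∈ ks →
      (ks.map (fun k => if p k then (if x = k then (1 : Int) else 0) else 0)).sum
        = if p x then 1 else 0 := by
  intro ks
  induction ks with
  | nil => intro _ hx; cases hx
  | cons k ks ih =>
    intro hnd hx
    rcases List.nodup_cons.mp hnd with ⟨hk, hnd'⟩
    simp only [List.map_cons, List.sum_cons]
    rcases List.mem_cons.mp hx with rfl | hx'
    · have : (ks.map (fun j => if p j then (if x = j then (1 : Int) else 0) else 0)).sum = 0 := by
        apply List.sum_eq_zero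
        intro v hv
        rcases List.mem_map.mp hv with ⟨j, hj, rfl⟩
        have : x ≠ j := fun h => hk (h ▸ hj)
        simp [this]
      simp [this]
    · have hne : x ≠ k := fun h => hk (h ▸ hx')
      rw [ih hnd' hx']
      simp [hne]

-- master aggregation: summing p-guarded multiplicities over any nodup key list covering l
-- yields countP p l
theorem pv_sum_counts (p : String → Bool) (ks : List String) (hnd : ks.Nodup) :
    ∀ (l : List String), (∀ a ∈ l, a ∈ ks) →
      (ks.map (fun k => if p k then (l.count k : Int) else 0)).sum = (l.countP p : Int) := by
  intro l
  induction l with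
  | nil => intro _; simp
  | cons x l ih =>
    intro hcov
    have hx : x ∈ ks := hcov x (List.mem_cons_self)
    have hcov' : ∀ a ∈ l, a ∈ ks := fun a ha => hcov a (List.mem_cons_of_mem _ ha)
    have hsplit : ∀ k : String,
        (if p k then ((x :: l).count k : Int) else 0)
          = (if p k then (l.count k : Int) else 0) + (if p k then (if x = k then (1:Int) else 0) else 0) := by
      intro k
      by_cases hpk : p k = true
      · by_cases hxk : x = k <;> simp [hpk, hxk]
      · simp [hpk]
    calc ((ks.map (fun k => if p k then ((x :: l).count k : Int) else 0)).sum)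
        = ((ks.map (fun k => (if p k then (l.count k : Int) else 0)
              + (if p k then (if x = k then (1:Int) else 0) else 0))).sum) := by
          congr 1; exact List.map_congr_left (fun k _ => hsplit k)
      _ = ((ks.map (fun k => if p k then (l.count k : Int) else 0)).sum)
            + ((ks.map (fun k => if p k then (if x = k then (1:Int) else 0) else 0)).sum) := by
          rw [← List.sum_map_add]
      _ = (l.countP p : Int) + (if p x then 1 else 0) := by
          rw [ih hcov', pv_sum_indicator p x ks hnd hx]
      _ = ((x :: l).countP p : Int) := by
          by_cases hpx : p x = true <;> simp [hpx]


-- summing f over a filtered list = summing the guarded f over the whole list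
theorem pv_sum_filter_map (p : String → Bool) (f : String → Int) :
    ∀ (l : List String), ((l.filter p).map f).sum = (l.map (fun k => if p k then f k else 0)).sum := by
  intro l
  induction l with
  | nil => simp
  | cons x l ih =>
    by_cases hx : p x = true <;> simp [hx, ih]

-- B's frequency dictionary IS the counter of the mapped origins
theorem pv_freq_eq_counter (l : List String) :
    l.foldl (fun (d : PySem.Dict String Int) read_id =>
        let o := pvOrigin read_id
        d.insert o (d.getD o 0 + 1)) PySem.Dict.empty
      = PySem.Dict.counter (l.map pvOrigin) := by
  rw [← PySem.Dict.foldl_insert_getD_add_one_eq_counter, List.foldl_map]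

-- ===== VERDICT (by name: the statement is the Claim_ definition above) =====
theorem bsj_total_circ_design_py_spec : Claim_equal_bsj_total_circ_design_py := by
  intro bsj_id reads _ _
  show _ = _
  unfold bsj_total_circ_design_py bsj_total_circ_design_py_alt
  simp only [pv_fold_eq, pv_freq_eq_counter, zero_add]
  have hks : (PySem.Set.ofList (reads.map pvOrigin)).Nodup :=
    PySem.Set.nodup_ofList (reads.map pvOrigin)
  have hcov : ∀ a ∈ reads.map pvOrigin, a ∈ PySem.Set.ofList (reads.map pvOrigin) :=
    fun a ha => (PySem.Set.mem_ofList _ _).mpr ha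
  -- total
  have htotal : (PySem.Dict.counter (reads.map pvOrigin)).values.sum
      = ((reads.map pvOrigin).length : Int) := by
    rw [PySem.Dict.values, PySem.Dict.items_counter]
    have := pv_sum_counts (fun _ => true) (PySem.Set.ofList (reads.map pvOrigin)) hks
      (reads.map pvOrigin) hcov
    simpa [List.map_map, Function.comp] using this
  -- circ
  have hcirc : (((PySem.Dict.counter (reads.map pvOrigin)).items.filter
        (fun p => PySem.Str.startswith p.1 "chr")).map (·.2)).sum
      = ((reads.map pvOrigin).countP (fun o => PySem.Str.startswith o "chr") : Int) := by
    rw [PySem.Dict.items_counter, List.filter_map, List.map_map]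
    have := pv_sum_counts (fun o => PySem.Str.startswith o "chr")
      (PySem.Set.ofList (reads.map pvOrigin)) hks (reads.map pvOrigin) hcov
    rw [← this, ← pv_sum_filter_map]
    simp [Function.comp_def]
  -- design
  have hdesign : (PySem.Dict.counter (reads.map pvOrigin)).getD (pvStripJunction bsj_id) 0
      = ((reads.map pvOrigin).count (pvStripJunction bsj_id) : Int) :=
    PySem.Dict.getD_counter (reads.map pvOrigin) (pvStripJunction bsj_id)
  rw [htotal, hcirc, hdesign]
  simp
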